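-- pv_equiv track=rewrite | github.com/carloterzaghi/Discord_Bot_Kurami | artefatos_genshin/hp_artefato.py | hp_artefato
-- ===== SOURCE A (Python) =====
-- def hp_artefato(nome):
--     if nome == "Vazio":
--         return ""
--     elif nome == "Flor":
--         return "0"
--     hp = ''
--     pegar = 'nao'
--     for i in nome:
--         if i == "P":
--             pegar = 'sim'
--         elif i.isnumeric() == False:
--             pegar = 'nao'
--         elif pegar == 'sim':
--             hp = hp + i
--     if hp == '':
--         hp = '0'
--     return hp
-- ===== SOURCE B (Python) =====
-- def hp_artefato(nome):
--     if nome == "Vazio":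
--         return ""
--     if nome == "Flor":
--         return "0"
--     runs = []
--     i = 0
--     n = len(nome)
--     while i < n:
--         if nome[i] == 'P':
--             i += 1
--             j = i
--             while j < n and nome[j].isnumeric():
--                 j += 1
--             runs.append(nome[i:j])
--             i = j
--         else:
--             i += 1
--     hp = ''.join(runs)
--     return hp if hp else '0'
-- ===== Notes on version B (the rewrite author's own statement) =====
-- stated objective: alternative
-- what changed: Replaced the flag-driven per-character state machine with an index scan that locates each marker character and consumes the following digit run as a block, joining the runs at the end.
import Mathlib
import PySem

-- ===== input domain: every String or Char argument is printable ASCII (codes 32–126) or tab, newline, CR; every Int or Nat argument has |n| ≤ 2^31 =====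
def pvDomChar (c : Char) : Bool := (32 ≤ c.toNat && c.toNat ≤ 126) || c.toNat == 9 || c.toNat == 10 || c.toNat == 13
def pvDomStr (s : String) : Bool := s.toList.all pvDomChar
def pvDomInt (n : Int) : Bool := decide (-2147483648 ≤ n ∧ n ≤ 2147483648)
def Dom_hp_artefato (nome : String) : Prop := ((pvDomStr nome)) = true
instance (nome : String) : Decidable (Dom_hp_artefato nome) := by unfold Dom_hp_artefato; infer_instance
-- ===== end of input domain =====

-- B replaces A's flag-driven per-character state machine by an index scan that grabs each
-- digit run following a 'P' as a block (objective: alternative decomposition, same cost).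
-- Python's str.isnumeric is ported as PySem.Chars.isdigit: exact on the ASCII domain Dom_.
-- The string accumulator 'hp' is represented as its List Char (exact; final String.ofList).

-- ===== PORT A =====
-- one step of A's for-loop: state is (hp, pegar) with pegar the string 'sim'/'nao'
def hpStepA (st : List Char × String) (c : Char) : List Char × String :=
  if c = 'P' then (st.1, "sim")
  else if PySem.Chars.isdigit c = false then (st.1, "nao")
  else if st.2 = "sim" then (st.1 ++ [c], st.2)
  else st

def hp_artefato (nome : String) : String :=
  if nome = "Vazio" then ""
  else if nome = "Flor" then "0"
  else
    let hp := (nome.toList.foldl hpStepA ([], "nao")).1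
    if hp = [] then "0" else String.ofList hp

-- ===== PORT B =====
-- inner while-loop of B: consume the leading digit run, return (run, rest)
def hpGrabRun : List Char → List Char × List Char
  | [] => ([], [])
  | c :: r =>
    if PySem.Chars.isdigit c then
      let p := hpGrabRun r
      (c :: p.1, p.2)
    else ([], c :: r)

theorem hpGrabRun_snd_len : ∀ (cs : List Char), (hpGrabRun cs).2.length ≤ cs.length := by
  intro cs
  induction cs with
  | nil => simp [hpGrabRun]
  | cons c r ih =>
    simp only [hpGrabRun]
    split
    · simpa using Nat.le_succ_of_le ih
    · simp

-- outer while-loop of B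
def hpAltScan : List Char → List Char
  | [] => []
  | c :: r =>
    if c = 'P' then
      let p := hpGrabRun r
      p.1 ++ hpAltScan p.2
    else hpAltScan r
termination_by cs => cs.length
decreasing_by
  · exact Nat.lt_succ_of_le (hpGrabRun_snd_len r)
  · simp

def hp_artefato_alt (nome : String) : String :=
  if nome = "Vazio" then ""
  else if nome = "Flor" then "0"
  else
    let hp := hpAltScan nome.toList
    if hp = [] then "0" else String.ofList hp

-- ===== PRECONDITION & SPEC =====
def Spec_hp_artefato (nome : String) (out : String) : Prop := out = hp_artefato_alt nome
instance (nome : String) (out : String) : Decidable (Spec_hp_artefato nome out) := by unfold Spec_hp_artefato; infer_instance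

-- ===== CLAIM (what is proved, stated in full; the proofs are below) =====
def Claim_equal_hp_artefato : Prop := ∀ (nome : String), Dom_hp_artefato nome → Spec_hp_artefato nome (hp_artefato nome)

-- ===== LEMMAS AND PROOFS =====

-- reference recursion: A's state machine with the flag as a Bool
def hpScanA : List Char → Bool → List Char
  | [], _ => []
  | c :: r, f =>
    if c = 'P' then hpScanA r true
    else if PySem.Chars.isdigit c = false then hpScanA r false
    else if f then c :: hpScanA r true
    else hpScanA r false

theorem hpFoldA_eq (cs : List Char) : ∀ (acc : List Char) (p : String),
    (cs.foldl hpStepA (acc, p)).1 = acc ++ hpScanA cs (p = "sim" : Bool) := by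
  induction cs with
  | nil => intro acc p; simp [hpScanA]
  | cons c r ih =>
    intro acc p
    simp only [List.foldl_cons, hpStepA, hpScanA]
    by_cases hP : c = 'P'
    · simp [hP, ih]
    · by_cases hd : PySem.Chars.isdigit c
      · by_cases hs : p = "sim"
        · simp [hP, hd, hs, ih]
        · have : (p = "sim" : Bool) = false := by simpa using hs
          simp [hP, hd, hs, this, ih]
      · simp [hP, hd, ih]

theorem hpGrabRun_eq (cs : List Char) :
    hpGrabRun cs = (cs.takeWhile PySem.Chars.isdigit, cs.dropWhile PySem.Chars.isdigit) := by
  induction cs with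
  | nil => simp [hpGrabRun]
  | cons c r ih =>
    by_cases hd : PySem.Chars.isdigit c
    · simp [hpGrabRun, hd, ih, List.takeWhile_cons, List.dropWhile_cons]
    · simp [hpGrabRun, hd, List.takeWhile_cons]

theorem hpScanA_true_eq (cs : List Char) :
    hpScanA cs true =
      cs.takeWhile PySem.Chars.isdigit ++ hpScanA (cs.dropWhile PySem.Chars.isdigit) false := by
  induction cs with
  | nil => simp [hpScanA]
  | cons c r ih =>
    by_cases hd : PySem.Chars.isdigit c
    · have hP : ¬ (c = 'P') := by
        intro h; rw [h] at hd; simp [PySem.Chars.isdigit] at hd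
      simp [hpScanA, hP, hd, List.takeWhile_cons, List.dropWhile_cons, ih]
    · by_cases hP : c = 'P'
      · simp [hpScanA, hP, hd, List.takeWhile_cons, List.dropWhile_cons,
          show ¬ PySem.Chars.isdigit 'P' = true by simp [PySem.Chars.isdigit]]
      · simp [hpScanA, hP, hd, List.takeWhile_cons, List.dropWhile_cons]

theorem hpAltScan_eq (cs : List Char) : hpAltScan cs = hpScanA cs false := by
  induction cs using hpAltScan.induct with
  | case1 => simp [hpAltScan, hpScanA]
  | case2 r p ih =>
    rw [hpAltScan]
    simp only [p, hpGrabRun_eq] at ih ⊢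
    simp [hpScanA, hpScanA_true_eq r, ih, PySem.Chars.isdigit]
  | case3 c r hP ih =>
    rw [hpAltScan, if_neg hP]
    simp only [hpScanA, if_neg hP, ih]
    split <;> rfl

-- ===== VERDICT (by name: the statement is the Claim_ definition above) =====
theorem hp_artefato_spec : Claim_equal_hp_artefato := by
  intro nome _
  unfold Spec_hp_artefato hp_artefato hp_artefato_alt
  have h : (nome.toList.foldl hpStepA ([], "nao")).1 = hpAltScan nome.toList := by
    rw [hpFoldA_eq, hpAltScan_eq]
    simp
  rw [h]
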